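-- pv_equiv track=rewrite | github.com/Jcz-6/DCU_Work | 1st_Year/CA117/Week_5/uppers_052.py | count_upper
-- ===== SOURCE A (Python) =====
-- def count_upper(s):
--    for c in s:
--       if not c.isupper():
--         s = s.replace(c, " ")
--    s = s.split()
--    max = 0
--    word = ""
--    for line in s:
--       if len(line) > max:
--          max = len(line)
--          word = line
--    return word
-- ===== SOURCE B (Python) =====
-- def count_upper(s):
--     best = ""
--     cur = ""
--     for c in s:
--         if c.isupper():
--             cur += c
--             if len(cur) > len(best):
--                 best = cur
--         else:
--             cur = ""
--     return best
-- ===== Notes on version B (the rewrite author's own statement) =====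
-- stated objective: faster
-- what changed: Replaced the replace-every-non-upper-char-then-split-then-scan pipeline (each replace rescans the whole string) by a single left-to-right pass that tracks the current uppercase run and keeps the first longest.
import Mathlib
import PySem

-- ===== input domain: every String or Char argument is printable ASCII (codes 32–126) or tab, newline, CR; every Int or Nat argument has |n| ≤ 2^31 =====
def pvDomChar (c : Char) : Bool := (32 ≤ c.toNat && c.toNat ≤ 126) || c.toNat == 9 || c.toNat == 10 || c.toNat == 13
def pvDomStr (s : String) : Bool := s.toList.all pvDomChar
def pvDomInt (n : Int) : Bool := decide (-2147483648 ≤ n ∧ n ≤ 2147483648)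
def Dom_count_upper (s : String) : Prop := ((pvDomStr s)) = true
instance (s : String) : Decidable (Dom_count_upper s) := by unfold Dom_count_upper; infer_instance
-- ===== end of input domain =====

-- B replaces A's repeated whole-string replace + split pipeline by one pass tracking the current uppercase run (objective: faster, single pass).

-- ===== PORT A =====
def count_upper (s : String) : String :=
  -- for c in s: if not c.isupper(): s = s.replace(c, " ")   (the loop iterates the ORIGINAL string)
  let s1 := s.toList.foldl
    (fun t c => if !(PySem.Chars.isupper c) then PySem.Str.replace t (String.ofList [c]) " " else t) s
  -- s = s.split()
  let ws := PySem.Str.split₀ s1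
  -- max = 0; word = ""; for line in s: if len(line) > max: …
  let r := ws.foldl
    (fun (p : Int × String) line =>
      if PySem.Str.len line > p.1 then (PySem.Str.len line, line) else p) (0, "")
  r.2

-- ===== PORT B =====
def count_upper_alt (s : String) : String :=
  -- best = ""; cur = ""; for c in s: if c.isupper(): cur += c; if len(cur) > len(best): best = cur; else: cur = ""
  let p := s.toList.foldl
    (fun (p : List Char × List Char) c =>
      if PySem.Chars.isupper c then
        let cur := p.2 ++ [c]
        ((if cur.length > p.1.length then cur else p.1), cur)
      else (p.1, ([] : List Char)))
    ([], [])
  String.ofList p.1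

-- ===== PRECONDITION & SPEC =====
def Spec_count_upper (s : String) (out : String) : Prop := out = count_upper_alt s
instance (s : String) (out : String) : Decidable (Spec_count_upper s out) := by unfold Spec_count_upper; infer_instance

-- ===== CLAIM (what is proved, stated in full; the proofs are below) =====
def Claim_equal_count_upper : Prop := ∀ (s : String), Dom_count_upper s → Spec_count_upper s (count_upper s)

-- ===== LEMMAS AND PROOFS =====

-- the character map A's replace loop applies: non-uppercase becomes a space
def pvMask1 (c : Char) : Char := if PySem.Chars.isupper c then c else ' '

-- the words A's split produces, computed over the original characters; rcur is the current run, reversed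
def pvWrev (rcur : List Char) : List Char → List (List Char)
  | [] => if rcur.isEmpty then [] else [rcur.reverse]
  | c :: cs =>
      if PySem.Chars.isupper c then pvWrev (c :: rcur) cs
      else if rcur.isEmpty then pvWrev [] cs else rcur.reverse :: pvWrev [] cs

-- replacing a single char by a single char is a pointwise map
theorem pv_replace_go_single (c r : Char) :
    ∀ (l : List Char) (fuel : Nat) (acc : List Char), l.length ≤ fuel →
      PySem.Chars.replace.go [c] [r] fuel l acc
        = acc.reverse ++ l.map (fun x => if x = c then r else x) := by
  intro l
  induction l with
  | nil =>
      intro fuel acc _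
      cases fuel <;> simp [PySem.Chars.replace.go]
  | cons x t ih =>
      intro fuel acc h
      cases fuel with
      | zero => simp at h
      | succ n =>
        by_cases hx : x = c
        · subst hx
          have : [x].isPrefixOf (x :: t) = true := by simp [List.isPrefixOf]
          simp only [PySem.Chars.replace.go, this, if_pos]
          have hn : t.length ≤ n := by simpa using h
          have hd : List.drop [x].length (x :: t) = t := by simp
          have ha : [r].reverse ++ acc = r :: acc := by simp
          rw [hd, ha, ih n (r :: acc) hn]
          simp
        · have : [c].isPrefixOf (x :: t) = false := by
            simp [List.isPrefixOf]
            exact fun hcx => hx hcx.symm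
          simp only [PySem.Chars.replace.go, this]
          have hn : t.length ≤ n := by simpa using h
          rw [ih n (x :: acc) hn]
          simp [hx]

theorem pv_replace_single (t : List Char) (c r : Char) :
    PySem.Chars.replace t [c] [r] = t.map (fun x => if x = c then r else x) := by
  simp [PySem.Chars.replace]
  exact pv_replace_go_single c r t t.length [] (le_refl _)

-- the whole replace loop, on the list side
theorem pv_mask_fold (cs : List Char) :
    ∀ t : List Char,
      cs.foldl (fun t c => if !(PySem.Chars.isupper c) then PySem.Chars.replace t [c] [' '] else t) t
        = t.map (fun x => if !(PySem.Chars.isupper x) && decide (x ∈ cs) then ' ' else x) := by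
  induction cs with
  | nil => intro t; simp
  | cons c cs ih =>
      intro t
      simp only [List.foldl_cons]
      by_cases hc : PySem.Chars.isupper c = true
      · rw [if_neg (by simp [hc])]
        rw [ih t]
        apply List.map_congr_left
        intro x _
        by_cases hx : PySem.Chars.isupper x = true
        · simp [hx]
        · by_cases hmem : x ∈ cs
          · simp [hx, hmem]
          · have hxc : ¬ x = c := fun h => hx (h ▸ hc)
            simp [hx, hmem, hxc]
      · rw [if_pos (by simp [hc])]
        rw [pv_replace_single, ih]
        rw [List.map_map]
        apply List.map_congr_left
        intro x _
        by_cases hxc : x = c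
        · subst hxc
          simp [Function.comp, hc]
        · by_cases hx : PySem.Chars.isupper x = true
          · simp [Function.comp, hxc, hx]
          · by_cases hmem : x ∈ cs <;> simp [Function.comp, hxc, hx, hmem]

-- the string-level replace loop computes the list-level one
theorem pv_mask_fold_str (cs : List Char) (t : String) :
    (cs.foldl (fun t c => if !(PySem.Chars.isupper c) then PySem.Str.replace t (String.ofList [c]) " " else t) t).toList
      = cs.foldl (fun t c => if !(PySem.Chars.isupper c) then PySem.Chars.replace t [c] [' '] else t) t.toList := by
  induction cs generalizing t with
  | nil => rfl
  | cons c cs ih =>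
      simp only [List.foldl_cons]
      by_cases hc : PySem.Chars.isupper c = true
      · rw [if_neg (by simp [hc]), if_neg (by simp [hc])]
        exact ih t
      · rw [if_pos (by simp [hc]), if_pos (by simp [hc])]
        rw [ih]
        congr 1
        simp [PySem.Str.replace]

-- an uppercase letter is not a space
theorem pv_isupper_not_isspace (c : Char) (h : PySem.Chars.isupper c = true) :
    PySem.Chars.isspace c = false := by
  simp only [PySem.Chars.isupper, Bool.and_eq_true, decide_eq_true_eq] at h
  have h1 : 65 ≤ c.toNat := h.1
  have h2 : c.toNat ≤ 90 := h.2
  simp only [PySem.Chars.isspace, Bool.or_eq_false_iff, Bool.and_eq_false_iff,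
    decide_eq_false_iff_not]
  omega

-- split₀ of the masked string yields exactly the uppercase runs
theorem pv_split_go_mask (cs : List Char) :
    ∀ (rcur : List Char) (acc : List (List Char)),
      PySem.Chars.split₀.go (cs.map pvMask1) rcur acc = acc.reverse ++ pvWrev rcur cs := by
  induction cs with
  | nil =>
      intro rcur acc
      by_cases h : rcur.isEmpty <;> simp [PySem.Chars.split₀.go, pvWrev, h]
  | cons c cs ih =>
      intro rcur acc
      by_cases hc : PySem.Chars.isupper c = true
      · have hs : PySem.Chars.isspace (pvMask1 c) = false := by
          simpa [pvMask1, hc] using pv_isupper_not_isspace c hc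
        have hm : pvMask1 c = c := by simp [pvMask1, hc]
        have hs' : PySem.Chars.isspace c = false := pv_isupper_not_isspace c hc
        simp only [List.map_cons, PySem.Chars.split₀.go, hm, hs', Bool.false_eq_true, if_false]
        rw [ih (c :: rcur) acc]
        simp [pvWrev, hc]
      · have hm : pvMask1 c = ' ' := by simp [pvMask1, hc]
        have hs : PySem.Chars.isspace (pvMask1 c) = true := by rw [hm]; decide
        simp only [List.map_cons, PySem.Chars.split₀.go, hs, if_true]
        by_cases hr : rcur.isEmpty
        · simp only [hr, if_true]
          rw [ih [] acc]
          simp [pvWrev, hc, hr]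
        · simp only [hr, Bool.false_eq_true, if_false]
          rw [ih [] (rcur.reverse :: acc)]
          simp [pvWrev, hc, hr]

-- A's word-scan over strings computes the list-level scan
theorem pv_strfold (ws : List (List Char)) :
    ∀ (m : Int) (w : List Char),
      (ws.map String.ofList).foldl
          (fun (p : Int × String) line =>
            if PySem.Str.len line > p.1 then (PySem.Str.len line, line) else p) (m, String.ofList w)
        = (fun q : Int × List Char => (q.1, String.ofList q.2))
            (ws.foldl (fun (p : Int × List Char) u =>
              if (u.length : Int) > p.1 then ((u.length : Int), u) else p) (m, w)) := by
  induction ws with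
  | nil => intro m w; rfl
  | cons u ws ih =>
      intro m w
      simp only [List.map_cons, List.foldl_cons]
      have hlen : PySem.Str.len (String.ofList u) = (u.length : Int) := by
        simp [PySem.Str.len]
      rw [hlen]
      by_cases h : (u.length : Int) > m
      · rw [if_pos h, if_pos h, ih]
      · rw [if_neg h, if_neg h, ih]

-- the core equivalence of the two scans
theorem pv_key (cs : List Char) :
    ∀ (best₀ best cur : List Char),
      ((cur.length ≤ best₀.length ∧ best = best₀) ∨ (best₀.length < cur.length ∧ best = cur)) →
      (cs.foldl (fun (p : List Char × List Char) c =>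
          if PySem.Chars.isupper c then
            ((if (p.2 ++ [c]).length > p.1.length then p.2 ++ [c] else p.1), p.2 ++ [c])
          else (p.1, ([] : List Char))) (best, cur)).1
        = ((pvWrev cur.reverse cs).foldl (fun (p : Int × List Char) u =>
            if (u.length : Int) > p.1 then ((u.length : Int), u) else p)
            ((best₀.length : Int), best₀)).2 := by
  induction cs with
  | nil =>
      intro best₀ best cur H
      simp only [List.foldl_nil]
      rcases H with ⟨h1, h2⟩ | ⟨h1, h2⟩
      · rw [h2]
        by_cases hce : cur.isEmpty
        · simp [pvWrev, hce]
        · simp only [pvWrev, List.isEmpty_reverse, hce, Bool.false_eq_true, if_false,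
            List.reverse_reverse, List.foldl_cons, List.foldl_nil]
          rw [if_neg (by exact_mod_cast not_lt.mpr h1)]
      · rw [h2]
        have hne : cur ≠ [] := by rintro rfl; simp at h1
        have hce : cur.isEmpty = false := by simpa [List.isEmpty_iff] using hne
        simp only [pvWrev, List.isEmpty_reverse, hce, Bool.false_eq_true, if_false,
          List.reverse_reverse, List.foldl_cons, List.foldl_nil]
        rw [if_pos (by exact_mod_cast h1)]
  | cons c cs ih =>
      intro best₀ best cur H
      by_cases hc : PySem.Chars.isupper c = true
      · have e : (cur ++ [c]).reverse = c :: cur.reverse := by simp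
        simp only [List.foldl_cons, hc, if_true]
        rw [show pvWrev cur.reverse (c :: cs) = pvWrev (cur ++ [c]).reverse cs by
          simp only [pvWrev]
          rw [if_pos hc, e]]
        rcases H with ⟨h1, h2⟩ | ⟨h1, h2⟩
        · rw [h2]
          by_cases h2' : (cur ++ [c]).length > best₀.length
          · rw [if_pos h2']
            exact ih best₀ (cur ++ [c]) (cur ++ [c]) (Or.inr ⟨h2', rfl⟩)
          · rw [if_neg h2']
            exact ih best₀ best₀ (cur ++ [c]) (Or.inl ⟨not_lt.mp h2', rfl⟩)
        · rw [h2]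
          have h2' : (cur ++ [c]).length > cur.length := by simp
          rw [if_pos h2']
          exact ih best₀ (cur ++ [c]) (cur ++ [c])
            (Or.inr ⟨by simpa using Nat.lt_succ_of_lt h1, rfl⟩)
      · simp only [List.foldl_cons, hc, Bool.false_eq_true, if_false]
        rcases H with ⟨h1, h2⟩ | ⟨h1, h2⟩
        · rw [h2]
          by_cases hce : cur.isEmpty
          · rw [show pvWrev cur.reverse (c :: cs) = pvWrev [] cs by
              simp [pvWrev, hc, hce, List.isEmpty_reverse]]
            exact ih best₀ best₀ [] (Or.inl ⟨Nat.zero_le _, rfl⟩)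
          · rw [show pvWrev cur.reverse (c :: cs) = cur :: pvWrev [] cs by
              simp [pvWrev, hc, List.isEmpty_reverse, hce]]
            simp only [List.foldl_cons]
            rw [if_neg (by exact_mod_cast not_lt.mpr h1)]
            exact ih best₀ best₀ [] (Or.inl ⟨Nat.zero_le _, rfl⟩)
        · rw [h2]
          have hne : cur ≠ [] := by rintro rfl; simp at h1
          have hce : cur.isEmpty = false := by simpa [List.isEmpty_iff] using hne
          rw [show pvWrev cur.reverse (c :: cs) = cur :: pvWrev [] cs by
            simp [pvWrev, hc, List.isEmpty_reverse, hce]]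
          simp only [List.foldl_cons]
          rw [if_pos (by exact_mod_cast h1)]
          exact ih cur cur [] (Or.inl ⟨Nat.zero_le _, rfl⟩)

-- ===== VERDICT (by name: the statement is the Claim_ definition above) =====
theorem count_upper_spec : Claim_equal_count_upper := by
  intro s _
  simp only [Spec_count_upper, count_upper, count_upper_alt]
  have hmask : (s.toList.foldl
      (fun t c => if !(PySem.Chars.isupper c) then PySem.Str.replace t (String.ofList [c]) " " else t)
      s).toList = s.toList.map pvMask1 := by
    rw [pv_mask_fold_str s.toList s, pv_mask_fold s.toList s.toList]
    apply List.map_congr_left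
    intro x hx
    have hd : decide (x ∈ s.toList) = true := decide_eq_true hx
    by_cases hu : PySem.Chars.isupper x = true
    · rw [pvMask1, if_pos hu]
      rw [if_neg (by simp [hu])]
    · rw [pvMask1, if_neg hu]
      rw [if_pos (by simp [hu, hd])]
  have hsplit : PySem.Str.split₀ (s.toList.foldl
      (fun t c => if !(PySem.Chars.isupper c) then PySem.Str.replace t (String.ofList [c]) " " else t) s)
      = (pvWrev [] s.toList).map String.ofList := by
    simp only [PySem.Str.split₀, PySem.Chars.split₀]
    rw [hmask, pv_split_go_mask s.toList [] []]
    simp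
  rw [hsplit]
  rw [show ("" : String) = String.ofList [] from rfl]
  rw [pv_strfold (pvWrev [] s.toList) 0 []]
  simp only []
  congr 1
  have hk := (pv_key s.toList [] [] [] (Or.inl ⟨Nat.le_refl 0, rfl⟩)).symm
  simp only [List.length_nil, Nat.cast_zero, List.reverse_nil] at hk
  exact hk
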